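-- pv_equiv track=rewrite | github.com/DimaZhornyk/hacka-con | preprocessor/processing.py | one_comb
-- ===== SOURCE A (Python) =====
-- def one_comb(comb, vec):
--     r = []
--     for i in range(len(vec)):
--         if i in comb:
--             r.append(vec[i])
--         else:
--             r.append((vec[i] + 1) % 2)
--     return r
-- ===== SOURCE B (Python) =====
-- def one_comb(comb, vec):
--     r = [(v + 1) % 2 for v in vec]
--     n = len(vec)
--     for i in comb:
--         if 0 <= i < n:
--             r[i] = vec[i]
--     return r
-- ===== Notes on version B (the rewrite author's own statement) =====
-- stated objective: alternative
-- what changed: Instead of testing membership in comb for every vector index, B flips the whole vector in one pass and then iterates over comb once, restoring the originals at in-range positions.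
import Mathlib
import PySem

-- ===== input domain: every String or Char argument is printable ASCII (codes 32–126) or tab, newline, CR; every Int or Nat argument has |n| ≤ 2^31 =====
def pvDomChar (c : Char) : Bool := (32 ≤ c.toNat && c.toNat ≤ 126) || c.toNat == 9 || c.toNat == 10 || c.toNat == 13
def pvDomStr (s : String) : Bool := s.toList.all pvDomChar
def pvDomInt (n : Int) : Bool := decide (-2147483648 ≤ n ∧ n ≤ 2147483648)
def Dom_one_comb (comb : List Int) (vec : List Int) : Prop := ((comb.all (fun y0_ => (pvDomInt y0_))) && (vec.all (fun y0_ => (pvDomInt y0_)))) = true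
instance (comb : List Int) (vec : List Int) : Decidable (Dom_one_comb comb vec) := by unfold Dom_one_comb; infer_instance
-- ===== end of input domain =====

-- B flips the whole vector in one pass and then walks comb once restoring the originals at in-range positions, instead of A's membership test in comb at every vector index.
-- ===== PORT A =====
def one_comb (comb : List Int) (vec : List Int) : List Int :=
  (List.range vec.length).foldl
    (fun (r : List Int) (i : ℕ) =>
      if ((i : Int) ∈ comb) then r ++ [vec.getD i 0]
      else r ++ [PySem.Int.mod (vec.getD i 0 + 1) 2]) []

-- ===== PORT B =====
def one_comb_alt (comb : List Int) (vec : List Int) : List Int :=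
  let r := vec.map (fun v => PySem.Int.mod (v + 1) 2)
  let n := vec.length
  comb.foldl (fun r i => if 0 ≤ i ∧ i < (n : Int) then r.set i.toNat (vec.getD i.toNat 0) else r) r

-- ===== PRECONDITION & SPEC =====
def Spec_one_comb (comb : List Int) (vec : List Int) (out : List Int) : Prop := out = one_comb_alt comb vec
instance (comb : List Int) (vec : List Int) (out : List Int) : Decidable (Spec_one_comb comb vec out) := by unfold Spec_one_comb; infer_instance

-- ===== CLAIM (what is proved, stated in full; the proofs are below) =====
def Claim_equal_one_comb : Prop := ∀ (comb : List Int) (vec : List Int), Dom_one_comb comb vec → Spec_one_comb comb vec (one_comb comb vec)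

-- ===== LEMMAS AND PROOFS =====

theorem foldl_app_singleton {α β : Type} (f : α → β) (l : List α) (acc : List β) :
    l.foldl (fun r i => r ++ [f i]) acc = acc ++ l.map f := by
  induction l generalizing acc with
  | nil => simp
  | cons a l ih => simp [ih]

theorem one_comb_eq_map (comb : List Int) (vec : List Int) :
    one_comb comb vec =
      (List.range vec.length).map
        (fun (i : ℕ) => if ((i : Int) ∈ comb) then vec.getD i 0 else PySem.Int.mod (vec.getD i 0 + 1) 2) := by
  unfold one_comb
  have hf : (fun (r : List Int) (i : ℕ) =>
      if ((i : Int) ∈ comb) then r ++ [vec.getD i 0]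
      else r ++ [PySem.Int.mod (vec.getD i 0 + 1) 2]) =
      (fun (r : List Int) (i : ℕ) => r ++ [if ((i : Int) ∈ comb) then vec.getD i 0 else PySem.Int.mod (vec.getD i 0 + 1) 2]) := by
    funext r i; split_ifs <;> rfl
  rw [hf, foldl_app_singleton]
  simp

theorem fold_set_length (vec : List Int) (comb : List Int) (r : List Int) :
    (comb.foldl (fun r i => if 0 ≤ i ∧ i < (vec.length : Int) then r.set i.toNat (vec.getD i.toNat 0) else r) r).length = r.length := by
  induction comb generalizing r with
  | nil => rfl
  | cons c cs ih =>
    simp only [List.foldl_cons]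
    rw [ih]
    split_ifs <;> simp

theorem fold_set_getD (vec : List Int) (comb : List Int) (r : List Int)
    (hlen : r.length = vec.length) (j : ℕ) (hj : j < vec.length) :
    (comb.foldl (fun r i => if 0 ≤ i ∧ i < (vec.length : Int) then r.set i.toNat (vec.getD i.toNat 0) else r) r).getD j 0 =
      if ((j : Int) ∈ comb) then vec.getD j 0 else r.getD j 0 := by
  induction comb generalizing r with
  | nil => simp
  | cons c cs ih =>
    simp only [List.foldl_cons]
    have hstep : (if 0 ≤ c ∧ c < (vec.length : Int) then r.set c.toNat (vec.getD c.toNat 0) else r).length = vec.length := by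
      split_ifs <;> simp [hlen]
    rw [ih _ hstep]
    by_cases hcs : ((j : Int) ∈ cs)
    · simp [hcs, List.mem_cons]
    · rw [if_neg hcs]
      by_cases hjc : ((j : Int) = c)
      · have hc : 0 ≤ c ∧ c < (vec.length : Int) := ⟨by omega, by omega⟩
        rw [if_pos hc, if_pos (by simp [hjc])]
        have hct : c.toNat = j := by omega
        have hjr : j < (r.set c.toNat (vec.getD c.toNat 0)).length := by
          rw [List.length_set]; omega
        rw [List.getD_eq_getElem _ 0 hjr, List.getElem_set, if_pos hct, hct]
      · have hnm : ¬ ((j : Int) ∈ c :: cs) := by simp [hjc, hcs]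
        rw [if_neg hnm]
        split_ifs with hc
        · have hct : c.toNat ≠ j := by omega
          have hjr : j < r.length := by omega
          have h1 : j < (r.set c.toNat (vec.getD c.toNat 0)).length := by
            rw [List.length_set]; omega
          rw [List.getD_eq_getElem _ 0 h1, List.getElem_set, if_neg hct,
              List.getD_eq_getElem r 0 hjr]
        · rfl

-- ===== VERDICT (by name: the statement is the Claim_ definition above) =====
theorem one_comb_spec : Claim_equal_one_comb := by
  intro comb vec _
  unfold Spec_one_comb
  have hB : one_comb_alt comb vec =
      comb.foldl (fun r i => if 0 ≤ i ∧ i < (vec.length : Int) then r.set i.toNat (vec.getD i.toNat 0) else r)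
        (vec.map (fun v => PySem.Int.mod (v + 1) 2)) := rfl
  rw [hB, one_comb_eq_map]
  apply List.ext_getElem
  · rw [fold_set_length]; simp
  · intro j h1 h2
    have hj : j < vec.length := by simpa using h1
    have hlen0 : (vec.map (fun v => PySem.Int.mod (v + 1) 2)).length = vec.length := by simp
    rw [← List.getD_eq_getElem _ 0 h1, ← List.getD_eq_getElem _ 0 h2,
        List.getD_eq_getElem _ 0 (by simpa using hj),
        fold_set_getD vec comb _ hlen0 j hj,
        List.getD_eq_getElem _ 0 (by simpa using hj)]
    simp only [List.getElem_map, List.getElem_range]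
    rw [List.getD_eq_getElem _ 0 hj]
    split_ifs <;> simp [List.getElem?_eq_getElem hj]
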